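-- pv_equiv track=rewrite | github.com/mukulvinod/BaseConversion-Calculator | main.py | hex_char_decode
-- ===== SOURCE A (Python) =====
-- def hex_char_decode(digit):
--     deci = 0
--     hex_digits = "0123456789ABCDEF"
--     digit = digit.upper()
--     for i in range(len(hex_digits)):
--         if hex_digits[i] == digit:
--             deci = i
--             break
--     return deci
-- ===== SOURCE B (Python) =====
-- def hex_char_decode(digit):
--     d = digit.upper()
--     if len(d) == 1 and '0' <= d <= '9':
--         return ord(d) - ord('0')
--     elif len(d) == 1 and 'A' <= d <= 'F':
--         return ord(d) - ord('A') + 10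
--     else:
--         return 0
-- ===== Notes on version B (the rewrite author's own statement) =====
-- stated objective: idiomatic
-- what changed: Replaced the linear scan over the 16-character hex lookup table with a direct arithmetic computation from the character code (ord), guarded by explicit digit/letter range checks.
import Mathlib
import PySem

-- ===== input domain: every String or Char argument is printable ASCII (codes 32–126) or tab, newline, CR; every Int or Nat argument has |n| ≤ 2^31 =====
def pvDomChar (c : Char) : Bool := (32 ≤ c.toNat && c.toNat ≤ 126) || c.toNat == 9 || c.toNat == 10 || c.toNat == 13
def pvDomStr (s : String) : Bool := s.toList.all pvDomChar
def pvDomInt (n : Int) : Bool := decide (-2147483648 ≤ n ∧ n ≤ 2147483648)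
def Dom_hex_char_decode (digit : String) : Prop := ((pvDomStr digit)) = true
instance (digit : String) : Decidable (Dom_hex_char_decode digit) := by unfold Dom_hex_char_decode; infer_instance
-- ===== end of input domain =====

-- B replaces A's scan of the hex lookup table with direct arithmetic on the character code; objective: idiomatic.

-- ===== PORT A =====
-- the constant hex_digits = "0123456789ABCDEF", written as its list of characters
def hexDigitsA : List Char :=
  ['0','1','2','3','4','5','6','7','8','9','A','B','C','D','E','F']

-- the loop 'for i in range(len(hex_digits)): if hex_digits[i] == digit: deci = i; break'
-- as a structural recursion carrying the loop index i; falling off the loop leaves deci = 0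
def hexScanA (d : List Char) : Int → List Char → Int
  | _, [] => 0
  | i, c :: rest => if [c] = d then i else hexScanA d (i + 1) rest

def hex_char_decode (digit : String) : Int :=
  hexScanA (PySem.Chars.upper digit.toList) 0 hexDigitsA

-- ===== PORT B =====
-- d = digit.upper(); if len(d)==1 and '0'<=d<='9': ord(d)-ord('0'); elif len(d)==1 and 'A'<=d<='F': ord(d)-ord('A')+10; else 0
def hex_char_decode_alt (digit : String) : Int :=
  match PySem.Chars.upper digit.toList with
  | [c] =>
    if '0' ≤ c ∧ c ≤ '9' then (c.toNat : Int) - 48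
    else if 'A' ≤ c ∧ c ≤ 'F' then (c.toNat : Int) - 65 + 10
    else 0
  | _ => 0

-- ===== PRECONDITION & SPEC =====
def Spec_hex_char_decode (digit : String) (out : Int) : Prop := out = hex_char_decode_alt digit
instance (digit : String) (out : Int) : Decidable (Spec_hex_char_decode digit out) := by unfold Spec_hex_char_decode; infer_instance

-- ===== CLAIM (what is proved, stated in full; the proofs are below) =====
def Claim_equal_hex_char_decode : Prop := ∀ (digit : String), Dom_hex_char_decode digit → Spec_hex_char_decode digit (hex_char_decode digit)

-- ===== LEMMAS AND PROOFS =====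

-- A's scan finds no match when the target is not a single character, so deci stays 0
lemma hexScanA_nonsingle (d : List Char) (h : ∀ c : Char, d ≠ [c]) :
    ∀ (i : Int) (l : List Char), hexScanA d i l = 0 := by
  intro i l
  induction l generalizing i with
  | nil => rfl
  | cons c rest ih =>
    simp only [hexScanA]
    rw [if_neg (fun hc => h c hc.symm)]
    exact ih _

-- on a single character, A's 16-step scan computes B's closed form
lemma hexScan_single (c : Char) :
    hexScanA [c] 0 hexDigitsA =
      (if '0' ≤ c ∧ c ≤ '9' then (c.toNat : Int) - 48
       else if 'A' ≤ c ∧ c ≤ 'F' then (c.toNat : Int) - 65 + 10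
       else 0) := by
  have key : ∀ a : Char, ¬ a = c → c.toNat ≠ a.toNat :=
    fun a h e => h (Char.ext (UInt32.toNat_inj.mp e.symm))
  simp only [hexScanA, hexDigitsA, List.cons.injEq, and_true]
  by_cases h0 : '0' = c
  · subst h0; decide
  rw [if_neg h0]
  by_cases h1 : '1' = c
  · subst h1; decide
  rw [if_neg h1]
  by_cases h2 : '2' = c
  · subst h2; decide
  rw [if_neg h2]
  by_cases h3 : '3' = c
  · subst h3; decide
  rw [if_neg h3]
  by_cases h4 : '4' = c
  · subst h4; decide
  rw [if_neg h4]
  by_cases h5 : '5' = c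
  · subst h5; decide
  rw [if_neg h5]
  by_cases h6 : '6' = c
  · subst h6; decide
  rw [if_neg h6]
  by_cases h7 : '7' = c
  · subst h7; decide
  rw [if_neg h7]
  by_cases h8 : '8' = c
  · subst h8; decide
  rw [if_neg h8]
  by_cases h9 : '9' = c
  · subst h9; decide
  rw [if_neg h9]
  by_cases hA : 'A' = c
  · subst hA; decide
  rw [if_neg hA]
  by_cases hB : 'B' = c
  · subst hB; decide
  rw [if_neg hB]
  by_cases hC : 'C' = c
  · subst hC; decide
  rw [if_neg hC]
  by_cases hD : 'D' = c
  · subst hD; decide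
  rw [if_neg hD]
  by_cases hE : 'E' = c
  · subst hE; decide
  rw [if_neg hE]
  by_cases hF : 'F' = c
  · subst hF; decide
  rw [if_neg hF]
  have n0 : c.toNat ≠ 48 := key _ h0
  have n1 : c.toNat ≠ 49 := key _ h1
  have n2 : c.toNat ≠ 50 := key _ h2
  have n3 : c.toNat ≠ 51 := key _ h3
  have n4 : c.toNat ≠ 52 := key _ h4
  have n5 : c.toNat ≠ 53 := key _ h5
  have n6 : c.toNat ≠ 54 := key _ h6
  have n7 : c.toNat ≠ 55 := key _ h7
  have n8 : c.toNat ≠ 56 := key _ h8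
  have n9 : c.toNat ≠ 57 := key _ h9
  have nA : c.toNat ≠ 65 := key _ hA
  have nB : c.toNat ≠ 66 := key _ hB
  have nC : c.toNat ≠ 67 := key _ hC
  have nD : c.toNat ≠ 68 := key _ hD
  have nE : c.toNat ≠ 69 := key _ hE
  have nF : c.toNat ≠ 70 := key _ hF
  rw [if_neg, if_neg]
  · rintro ⟨ha, hb⟩
    rw [Char.le_def] at ha hb
    replace ha : 65 ≤ c.toNat := ha
    replace hb : c.toNat ≤ 70 := hb
    omega
  · rintro ⟨ha, hb⟩
    rw [Char.le_def] at ha hb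
    replace ha : 48 ≤ c.toNat := ha
    replace hb : c.toNat ≤ 57 := hb
    omega

lemma hex_char_decode_eq (digit : String) :
    hex_char_decode digit = hex_char_decode_alt digit := by
  unfold hex_char_decode hex_char_decode_alt
  cases h : PySem.Chars.upper digit.toList with
  | nil => rw [hexScanA_nonsingle _ (by simp)]
  | cons c rest =>
    cases rest with
    | nil => exact hexScan_single c
    | cons c2 r2 => rw [hexScanA_nonsingle _ (by simp)]

-- ===== VERDICT (by name: the statement is the Claim_ definition above) =====
theorem hex_char_decode_spec : Claim_equal_hex_char_decode := by
  intro digit _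
  exact hex_char_decode_eq digit
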